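-- pv_equiv track=rewrite | github.com/DreamBoatOve/XRD_multiPhase_ID | XRD_simulator0.py | phaseFraction_generator
-- ===== SOURCE A (Python) =====
-- from typing import List
--
-- def phaseFraction_generator(num_phases: int,
--                             phaseFraction_min: int = 8,
--                             phaseFraction_step: int = 4) -> List[List[int]]:
--     """
--     Function 枚举所有满足以下条件的相分数组合:
--       1. 相数 = num_phases = 1/2/3/4
--       2. 各相分数皆 >= phaseFraction_min = 8， 比 8 小， XRD就看不到了
--       3. 各相分数之和 = 100
--       4. 每个相分数的步进为 phaseFraction_step (可模拟笔记中 8,12,16 等递增方式)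
--
--     参数:
--     num_phases : int
--         相的个数(例如 2 表示 2 相, 3 表示 3 相, 4 表示 4 相, 等等)
--     phaseFraction_min : int, 默认 8
--         每个相所占的最小比例(如笔记中每个相至少 8%)
--     total : int, 默认 100
--         总和(如笔记中相分数总和 100%)
--     phaseFraction_step : int, 默认 4
--         步长(如笔记中常见的 8,12,16,20... 这类 4 的倍数)
--
--     返回:
--     ----------
--     List[List[int]], 所有符合条件的相分数列表, 每个列表的长度等于 num_phases
--     =[
--         num_phases=1 [
--             [100],
--         ]
--         num_phases=2 [
--             [x, 100-x], x_min = 8, x step size = 4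
--         ]
--         num_phases=3 [
--             [x, y, 100-x-y], x_min = 8, y_min = 8, x step size = 4, y step size = 4
--         ]
--         num_phases=4 [
--             [x, y, z, 100-x-y-z], x_min = 8, y_min = 8, z_min = 8, x step size = 4, y step size = 4, z step size = 4
--         ]
--     ]
--
--     refer
--     """
--     TOTAL = 100
--     results = []
--
--     # 1) 相数 = 1
--     if num_phases == 1:
--         # 只有 [100] 一种可能
--         if 100 >= phaseFraction_min and (100 - phaseFraction_min) % phaseFraction_step == 0:
--             results.append([100])
--         return results
--
--     # 2) 相数 = 2
--     elif num_phases == 2: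
--         # 遍历第一个相 x, 第二个相 = 100 - x
--         for x in range(phaseFraction_min, TOTAL + 1, phaseFraction_step):
--             y = TOTAL - x
--             if y >= phaseFraction_min and (y - phaseFraction_min) % phaseFraction_step == 0:
--                 results.append([x, y])
--         return results
--
--     # 3) 相数 = 3
--     elif num_phases == 3:
--         # x + y + z = 100
--         # x, y, z 均 >= phaseFraction_min，且步进 = phaseFraction_step
--         for x in range(phaseFraction_min, TOTAL + 1, phaseFraction_step):
--             for y in range(phaseFraction_min, TOTAL - x + 1, phaseFraction_step):
--                 z = TOTAL - x - y
--                 if z >= phaseFraction_min and (z - phaseFraction_min) % phaseFraction_step == 0: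
--                     results.append([x, y, z])
--         return results
--
--     # 4) 相数 = 4
--     elif num_phases == 4:
--         # x + y + z + w = 100
--         for x in range(phaseFraction_min, TOTAL + 1, phaseFraction_step):
--             for y in range(phaseFraction_min, TOTAL - x + 1, phaseFraction_step):
--                 for z in range(phaseFraction_min, TOTAL - x - y + 1, phaseFraction_step):
--                     w = TOTAL - x - y - z
--                     if w >= phaseFraction_min and (w - phaseFraction_min) % phaseFraction_step == 0:
--                         results.append([x, y, z, w])
--         return results
--
--     # 如果 num_phases 不在 1~4 范围内, 返回空列表或抛出异常
--     else:
--         # 也可改为 raise ValueError("num_phases must be 1, 2, 3, or 4.")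
--         return results
-- ===== SOURCE B (Python) =====
-- def phaseFraction_generator(num_phases: int,
--                             phaseFraction_min: int = 8,
--                             phaseFraction_step: int = 4):
--     # One recursive helper instead of four hardcoded arity branches.
--     if not 1 <= num_phases <= 4:
--         return []
--
--     def combos(k, remaining):
--         if k == 1:
--             if remaining >= phaseFraction_min and (remaining - phaseFraction_min) % phaseFraction_step == 0:
--                 return [[remaining]]
--             return []
--         out = []
--         for x in range(phaseFraction_min, remaining + 1, phaseFraction_step):
--             for rest in combos(k - 1, remaining - x):
--                 out.append([x] + rest)
--         return out
--
--     return combos(num_phases, 100)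
-- ===== Notes on version B (the rewrite author's own statement) =====
-- stated objective: simpler
-- what changed: Replaces A's four hardcoded arity branches (explicit 1/2/3-deep nested loops) with a single recursive helper combos(k, remaining) plus an arity guard, preserving exact output order.
-- outside the precondition, e.g. on phaseFraction_generator(2, 8, 0): A raises ValueError, B raises ValueError; on phaseFraction_generator(1, 8, 0): A raises ZeroDivisionError, B raises ZeroDivisionError
import Mathlib
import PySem

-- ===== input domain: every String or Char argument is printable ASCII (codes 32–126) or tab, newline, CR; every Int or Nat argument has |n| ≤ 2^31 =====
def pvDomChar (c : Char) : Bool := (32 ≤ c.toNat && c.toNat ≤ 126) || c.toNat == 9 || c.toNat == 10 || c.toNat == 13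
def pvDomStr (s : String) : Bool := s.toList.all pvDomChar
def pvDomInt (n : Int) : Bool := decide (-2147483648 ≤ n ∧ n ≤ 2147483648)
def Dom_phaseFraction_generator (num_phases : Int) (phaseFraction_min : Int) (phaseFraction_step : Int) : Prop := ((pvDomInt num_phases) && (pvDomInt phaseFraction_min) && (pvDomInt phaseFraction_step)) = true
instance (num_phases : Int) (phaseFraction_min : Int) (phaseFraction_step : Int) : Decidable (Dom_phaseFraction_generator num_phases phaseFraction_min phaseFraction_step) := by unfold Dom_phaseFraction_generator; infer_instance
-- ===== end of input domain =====

-- B replaces A's four hardcoded arity branches by one recursive helper combos(k, remaining); objective: simpler.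

-- ===== PORT A =====
def phaseFraction_generator (num_phases : Int) (phaseFraction_min : Int) (phaseFraction_step : Int) : List (List Int) :=
  if num_phases = 1 then
    (if phaseFraction_min ≤ 100 ∧ PySem.Int.mod (100 - phaseFraction_min) phaseFraction_step = 0 then
      ([] : List (List Int)) ++ [[100]] else [])
  else if num_phases = 2 then
    (PySem.List.pyRange phaseFraction_min 101 phaseFraction_step).foldl (fun results x =>
      let y := 100 - x
      if phaseFraction_min ≤ y ∧ PySem.Int.mod (y - phaseFraction_min) phaseFraction_step = 0 then
        results ++ [[x, y]] else results) []
  else if num_phases = 3 then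
    (PySem.List.pyRange phaseFraction_min 101 phaseFraction_step).foldl (fun results x =>
      (PySem.List.pyRange phaseFraction_min (100 - x + 1) phaseFraction_step).foldl (fun results y =>
        let z := 100 - x - y
        if phaseFraction_min ≤ z ∧ PySem.Int.mod (z - phaseFraction_min) phaseFraction_step = 0 then
          results ++ [[x, y, z]] else results) results) []
  else if num_phases = 4 then
    (PySem.List.pyRange phaseFraction_min 101 phaseFraction_step).foldl (fun results x =>
      (PySem.List.pyRange phaseFraction_min (100 - x + 1) phaseFraction_step).foldl (fun results y =>
        (PySem.List.pyRange phaseFraction_min (100 - x - y + 1) phaseFraction_step).foldl (fun results z =>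
          let w := 100 - x - y - z
          if phaseFraction_min ≤ w ∧ PySem.Int.mod (w - phaseFraction_min) phaseFraction_step = 0 then
            results ++ [[x, y, z, w]] else results) results) results) []
  else []

-- ===== PORT B =====
-- the recursive helper combos(k, remaining) from Source B (k is the arity, recursion on k)
def pvCombos (phaseFraction_min phaseFraction_step : Int) : Nat → Int → List (List Int)
  | 0, _ => []
  | 1, remaining =>
      if remaining ≥ phaseFraction_min ∧ PySem.Int.mod (remaining - phaseFraction_min) phaseFraction_step = 0 then
        [[remaining]] else []
  | (k+2), remaining =>
      (PySem.List.pyRange phaseFraction_min (remaining + 1) phaseFraction_step).foldl (fun out x =>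
        (pvCombos phaseFraction_min phaseFraction_step (k+1) (remaining - x)).foldl (fun out rest =>
          out ++ [x :: rest]) out) []

def phaseFraction_generator_alt (num_phases : Int) (phaseFraction_min : Int) (phaseFraction_step : Int) : List (List Int) :=
  if 1 ≤ num_phases ∧ num_phases ≤ 4 then
    pvCombos phaseFraction_min phaseFraction_step num_phases.toNat 100
  else []

-- ===== PRECONDITION & SPEC =====
-- Pre_ excludes step = 0 with num_phases in 1..4: there Python A raises (ZeroDivisionError for
-- num_phases = 1, ValueError from range otherwise), and B raises identically.
def Pre_phaseFraction_generator (num_phases : Int) (phaseFraction_min : Int) (phaseFraction_step : Int) : Prop :=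
  phaseFraction_step ≠ 0 ∨ ¬ (1 ≤ num_phases ∧ num_phases ≤ 4)
instance (num_phases : Int) (phaseFraction_min : Int) (phaseFraction_step : Int) : Decidable (Pre_phaseFraction_generator num_phases phaseFraction_min phaseFraction_step) := by unfold Pre_phaseFraction_generator; infer_instance

def pvWitness_phaseFraction_generator : Int × Int × Int := (3, 8, 4)

def Spec_phaseFraction_generator (num_phases : Int) (phaseFraction_min : Int) (phaseFraction_step : Int) (out : List (List Int)) : Prop := out = phaseFraction_generator_alt num_phases phaseFraction_min phaseFraction_step
instance (num_phases : Int) (phaseFraction_min : Int) (phaseFraction_step : Int) (out : List (List Int)) : Decidable (Spec_phaseFraction_generator num_phases phaseFraction_min phaseFraction_step out) := by unfold Spec_phaseFraction_generator; infer_instance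

-- ===== CLAIM (what is proved, stated in full; the proofs are below) =====
def Claim_equal_phaseFraction_generator : Prop := ∀ (num_phases : Int) (phaseFraction_min : Int) (phaseFraction_step : Int), Dom_phaseFraction_generator num_phases phaseFraction_min phaseFraction_step → Pre_phaseFraction_generator num_phases phaseFraction_min phaseFraction_step → Spec_phaseFraction_generator num_phases phaseFraction_min phaseFraction_step (phaseFraction_generator num_phases phaseFraction_min phaseFraction_step)

-- ===== LEMMAS AND PROOFS =====

-- the inner loop of B's combos in flatMap normal form
theorem pv_combos_succ (m s : Int) (k : Nat) (r : Int) :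
    pvCombos m s (k+2) r =
      (PySem.List.pyRange m (r+1) s).flatMap
        (fun x => (pvCombos m s (k+1) (r - x)).map (fun rest => x :: rest)) := by
  rw [pvCombos]
  rw [show (fun (out : List (List Int)) (x : Int) =>
        (pvCombos m s (k+1) (r - x)).foldl (fun out rest => out ++ [x :: rest]) out) =
      (fun out x => out ++ (pvCombos m s (k+1) (r - x)).map (fun rest => x :: rest)) from ?_]
  · exact PySem.List.foldl_append_eq_flatMap _ _ _
  · funext out x
    exact PySem.List.foldl_append_singleton_eq_map _ _ _

theorem pv_combos_one (m s r : Int) :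
    pvCombos m s 1 r =
      if m ≤ r ∧ PySem.Int.mod (r - m) s = 0 then [[r]] else [] := by
  rfl

-- ===== VERDICT (by name: the statement is the Claim_ definition above) =====
theorem phaseFraction_generator_spec : Claim_equal_phaseFraction_generator := by
  intro np m s _ _
  unfold Spec_phaseFraction_generator phaseFraction_generator phaseFraction_generator_alt
  by_cases h1 : np = 1
  · subst h1
    simp [pv_combos_one]
  by_cases h2 : np = 2
  · subst h2
    simp [pv_combos_succ, pv_combos_one]
    rw [PySem.List.foldl_congr_mem
      (g := fun (res : List (List Int)) x =>
        res ++ (if m ≤ 100 - x ∧ PySem.Int.mod (100 - x - m) s = 0 then [[x, 100 - x]] else []))]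
    · rw [PySem.List.foldl_append_eq_flatMap]
      simp
      apply List.flatMap_congr
      intro x _
      split_ifs <;> simp
    · intro acc x _
      split_ifs <;> simp
  by_cases h3 : np = 3
  · subst h3
    simp [pv_combos_succ, pv_combos_one]
    rw [PySem.List.foldl_congr_mem
      (g := fun (res : List (List Int)) x =>
        res ++ (PySem.List.pyRange m (100 - x + 1) s).flatMap
          (fun y => if m ≤ 100 - x - y ∧ PySem.Int.mod (100 - x - y - m) s = 0
                    then [[x, y, 100 - x - y]] else []))]
    · rw [PySem.List.foldl_append_eq_flatMap]
      simp
      apply List.flatMap_congr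
      intro x _
      simp only [List.map_flatMap, List.map_map]
      apply List.flatMap_congr
      intro y _
      split_ifs <;> simp
    · intro acc x _
      rw [show (fun (res : List (List Int)) y =>
            if m ≤ 100 - x - y ∧ PySem.Int.mod (100 - x - y - m) s = 0
            then res ++ [[x, y, 100 - x - y]] else res) =
          (fun res y =>
            res ++ (if m ≤ 100 - x - y ∧ PySem.Int.mod (100 - x - y - m) s = 0
                    then [[x, y, 100 - x - y]] else [])) from ?_]
      · exact PySem.List.foldl_append_eq_flatMap _ _ _
      · funext res y; split_ifs <;> simp
  by_cases h4 : np = 4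
  · subst h4
    simp [pv_combos_succ, pv_combos_one]
    rw [PySem.List.foldl_congr_mem
      (g := fun (res : List (List Int)) x =>
        res ++ (PySem.List.pyRange m (100 - x + 1) s).flatMap
          (fun y => (PySem.List.pyRange m (100 - x - y + 1) s).flatMap
            (fun z => if m ≤ 100 - x - y - z ∧ PySem.Int.mod (100 - x - y - z - m) s = 0
                      then [[x, y, z, 100 - x - y - z]] else [])))]
    · rw [PySem.List.foldl_append_eq_flatMap]
      simp
      apply List.flatMap_congr
      intro x _
      simp only [List.map_flatMap, List.map_map]
      apply List.flatMap_congr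
      intro y _
      apply List.flatMap_congr
      intro z _
      split_ifs <;> simp
    · intro acc x _
      rw [PySem.List.foldl_congr_mem
        (g := fun (res : List (List Int)) y =>
          res ++ (PySem.List.pyRange m (100 - x - y + 1) s).flatMap
            (fun z => if m ≤ 100 - x - y - z ∧ PySem.Int.mod (100 - x - y - z - m) s = 0
                      then [[x, y, z, 100 - x - y - z]] else []))]
      · exact PySem.List.foldl_append_eq_flatMap _ _ _
      · intro res y _
        rw [show (fun (res : List (List Int)) z =>
              if m ≤ 100 - x - y - z ∧ PySem.Int.mod (100 - x - y - z - m) s = 0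
              then res ++ [[x, y, z, 100 - x - y - z]] else res) =
            (fun res z =>
              res ++ (if m ≤ 100 - x - y - z ∧ PySem.Int.mod (100 - x - y - z - m) s = 0
                      then [[x, y, z, 100 - x - y - z]] else [])) from ?_]
        · exact PySem.List.foldl_append_eq_flatMap _ _ _
        · funext res z; split_ifs <;> simp
  · have : ¬ (1 ≤ np ∧ np ≤ 4) := by omega
    simp [h1, h2, h3, h4, this]
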